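-- pv_equiv track=rewrite | github.com/DanoBuck/MicrosoftCodingCompetition2016 | Python/run-length-encoding_DanielMateusPires.py | decodeAllCaps
-- ===== SOURCE A (Python) =====
-- def decodeAllCaps(line):
-- 	listOfCompression = "0123456789ABCDEF"
-- 	nextValueHex = False
-- 	nextValueToEncode = False
-- 	decodedLine = ""
-- 	repeats = 0
-- 	for c in line:
-- 		if nextValueToEncode:
-- 			for i in range(repeats):
-- 				decodedLine += c
-- 			nextValueToEncode = False
-- 		elif nextValueHex:
-- 			nextValueHex = False
-- 			nextValueToEncode = True
-- 			repeats = listOfCompression.find(c) + 3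
--
-- 		elif c == '\\':
-- 			nextValueHex = True
-- 		else:
-- 			decodedLine += c
-- 	return decodedLine
-- ===== SOURCE B (Python) =====
-- def decodeAllCaps(line):
--     hexdigits = "0123456789ABCDEF"
--     pieces = []
--     i = 0
--     n = len(line)
--     while i < n:
--         c = line[i]
--         if c == '\\':
--             if i + 2 >= n:
--                 break  # truncated escape at the end of the string emits nothing
--             repeats = hexdigits.find(line[i + 1]) + 3
--             pieces.append(line[i + 2] * repeats)
--             i += 3
--         else:
--             pieces.append(c)
--             i += 1
--     return ''.join(pieces)
-- ===== Notes on version B (the rewrite author's own statement) =====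
-- stated objective: simpler
-- what changed: Replaces A's flag-based state machine (nextValueHex/nextValueToEncode/repeats carried across iterations) by a single lookahead loop that consumes a whole '\'+hex+char escape in one step and joins collected pieces.
import Mathlib
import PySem

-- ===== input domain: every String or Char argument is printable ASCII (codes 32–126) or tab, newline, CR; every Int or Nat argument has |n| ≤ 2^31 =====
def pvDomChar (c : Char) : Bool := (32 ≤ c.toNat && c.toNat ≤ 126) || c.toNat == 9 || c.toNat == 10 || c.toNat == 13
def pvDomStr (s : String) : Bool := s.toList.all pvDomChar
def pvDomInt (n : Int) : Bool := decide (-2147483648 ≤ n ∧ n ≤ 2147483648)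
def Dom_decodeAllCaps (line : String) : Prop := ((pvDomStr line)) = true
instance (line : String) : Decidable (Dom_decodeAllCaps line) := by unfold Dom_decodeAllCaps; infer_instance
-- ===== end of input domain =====

-- B replaces A's flag-based state machine by an index-free lookahead pass (consume '\'+hex+char in one step); objective: simpler, same cost.

-- ===== PORT A =====
-- one step of A's for-loop; state = (nextValueHex, nextValueToEncode, decodedLine, repeats)
def aStep (st : Bool × Bool × List Char × Int) (c : Char) : Bool × Bool × List Char × Int :=
  let (hex, toEnc, dec, reps) := st
  if toEnc then
    -- for i in range(repeats): decodedLine += c  (range of a negative int is empty)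
    (hex, false, dec ++ List.replicate reps.toNat c, reps)
  else if hex then
    (false, true, dec, PySem.Chars.find "0123456789ABCDEF".toList [c] + 3)
  else if c = '\\' then
    (true, toEnc, dec, reps)
  else
    (hex, toEnc, dec ++ [c], reps)

def decodeAllCaps (line : String) : String :=
  String.ofList (line.toList.foldl aStep (false, false, [], 0)).2.2.1

-- ===== PORT B =====
-- lookahead decode: an escape consumes three characters at once; a truncated escape emits nothing
def altGo : List Char → List Char
  | '\\' :: h :: c :: rest =>
      List.replicate ((PySem.Chars.find "0123456789ABCDEF".toList [h] + 3)).toNat c ++ altGo rest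
  | '\\' :: _ => []
  | c :: rest => c :: altGo rest
  | [] => []

def decodeAllCaps_alt (line : String) : String :=
  String.ofList (altGo line.toList)

-- ===== PRECONDITION & SPEC =====
def Spec_decodeAllCaps (line : String) (out : String) : Prop := out = decodeAllCaps_alt line
instance (line : String) (out : String) : Decidable (Spec_decodeAllCaps line out) := by unfold Spec_decodeAllCaps; infer_instance

-- ===== CLAIM (what is proved, stated in full; the proofs are below) =====
def Claim_equal_decodeAllCaps : Prop := ∀ (line : String), Dom_decodeAllCaps line → Spec_decodeAllCaps line (decodeAllCaps line)

-- ===== LEMMAS AND PROOFS =====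

theorem foldA_eq_altGo (l : List Char) : ∀ (acc : List Char) (r : Int),
    ((l.foldl aStep (false, false, acc, r)).2.2.1) = acc ++ altGo l := by
  induction l using altGo.induct with
  | case1 h c rest ih =>
      intro acc r
      simp [List.foldl, aStep, altGo, ih]
  | case2 rest hrest =>
      intro acc r
      cases rest with
      | nil => simp [List.foldl, aStep, altGo]
      | cons h t =>
        cases t with
        | nil => simp [List.foldl, aStep, altGo]
        | cons c t' => exact (hrest h c t' rfl).elim
  | case3 c rest h1 h2 ih =>
      intro acc r
      have hc : c ≠ '\\' := h2
      simp [List.foldl, aStep, altGo, hc, ih]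
  | case4 => intro acc r; simp [List.foldl, altGo]

-- ===== VERDICT (by name: the statement is the Claim_ definition above) =====
theorem decodeAllCaps_spec : Claim_equal_decodeAllCaps := by
  intro line _
  unfold Spec_decodeAllCaps decodeAllCaps decodeAllCaps_alt
  rw [foldA_eq_altGo]
  simp
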